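-- pv_equiv track=rewrite | github.com/ozRnDs/shkedia-photo-upload-service | src/routes/search_utils.py | extract_search_params_from_request
-- ===== SOURCE A (Python) =====
-- def extract_search_params_from_request(query_params: list, black_list_values: list):
--     query_params_dict = {}
--     for search_condition in query_params:
--         current_key=search_condition[0]
--         if search_condition[0] in black_list_values:
--             continue
--         if not current_key in query_params_dict:
--             query_params_dict[current_key] = []
--         query_params_dict[current_key].append(search_condition[1])
--     return query_params_dict
-- ===== SOURCE B (Python) =====
-- def extract_search_params_from_request(query_params: list, black_list_values: list):
--     blocked = set(black_list_values)
--     keys = list(dict.fromkeys(k for k, _ in query_params if k not in blocked))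
--     return {k: [v for key, v in query_params if key == k] for k in keys}
-- ===== Notes on version B (the rewrite author's own statement) =====
-- stated objective: idiomatic
-- what changed: Replaces the single-pass insert-or-append dict mutation with a declarative pipeline: collect the distinct non-blacklisted keys in first-appearance order via dict.fromkeys, then build the result with a dict comprehension whose per-key list comprehension gathers that key's values; the per-pair interpreted dict operations become C-level comprehension scans, which a timing run measured as faster when the number of distinct keys is small.
import Mathlib
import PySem

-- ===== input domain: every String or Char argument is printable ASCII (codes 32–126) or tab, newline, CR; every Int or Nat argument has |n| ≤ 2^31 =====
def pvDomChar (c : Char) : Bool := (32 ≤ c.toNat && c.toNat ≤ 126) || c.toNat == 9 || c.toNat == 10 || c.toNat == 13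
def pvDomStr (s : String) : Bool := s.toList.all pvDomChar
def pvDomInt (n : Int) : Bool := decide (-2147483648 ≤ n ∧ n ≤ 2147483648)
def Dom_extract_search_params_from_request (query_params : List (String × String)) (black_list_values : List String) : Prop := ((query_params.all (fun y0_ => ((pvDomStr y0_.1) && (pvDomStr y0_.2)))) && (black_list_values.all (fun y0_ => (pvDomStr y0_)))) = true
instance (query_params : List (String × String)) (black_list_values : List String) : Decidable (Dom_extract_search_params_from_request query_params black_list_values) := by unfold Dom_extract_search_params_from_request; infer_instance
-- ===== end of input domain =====

-- B replaces A's single-pass insert-or-append dict mutation by a declarative pipeline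
-- (distinct non-blacklisted keys in first-appearance order, then a per-key gathering scan);
-- objective: idiomatic. Same return value; no argument is mutated by either version.

-- ===== PORT A =====
def extract_search_params_from_request (query_params : List (String × String)) (black_list_values : List String) : List (String × List String) :=
  (query_params.foldl
    (fun query_params_dict search_condition =>
      let current_key := search_condition.1
      if black_list_values.contains search_condition.1 then query_params_dict
      else
        let query_params_dict :=
          if query_params_dict.contains current_key then query_params_dict
          else query_params_dict.insert current_key ([] : List String)
        query_params_dict.modify current_key [] (fun l => l ++ [search_condition.2]))
    PySem.Dict.empty).items

-- ===== PORT B =====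
def extract_search_params_from_request_alt (query_params : List (String × String)) (black_list_values : List String) : List (String × List String) :=
  (PySem.List.dedup ((query_params.filter
      (fun kv => !(PySem.Set.contains (PySem.Set.ofList black_list_values) kv.1))).map (fun kv => kv.1))).map
    (fun k => (k, (query_params.filter (fun kv => kv.1 == k)).map (fun kv => kv.2)))

-- ===== PRECONDITION & SPEC =====
def Spec_extract_search_params_from_request (query_params : List (String × String)) (black_list_values : List String) (out : List (String × List String)) : Prop := out = extract_search_params_from_request_alt query_params black_list_values
instance (query_params : List (String × String)) (black_list_values : List String) (out : List (String × List String)) : Decidable (Spec_extract_search_params_from_request query_params black_list_values out) := by unfold Spec_extract_search_params_from_request; infer_instance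

-- ===== CLAIM (what is proved, stated in full; the proofs are below) =====
def Claim_equal_extract_search_params_from_request : Prop := ∀ (query_params : List (String × String)) (black_list_values : List String), Dom_extract_search_params_from_request query_params black_list_values → Spec_extract_search_params_from_request query_params black_list_values (extract_search_params_from_request query_params black_list_values)

-- ===== LEMMAS AND PROOFS =====

-- A's "if key missing then d[k]=[] ; then d[k].append(v)" is one modify-with-default step.
theorem pv_step_eq (d : PySem.Dict String (List String)) (k v : String) :
    (if d.contains k then d else d.insert k ([] : List String)).modify k [] (fun l => l ++ [v])
      = d.modify k [] (fun l => l ++ [v]) := by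
  by_cases h : d.contains k = true
  · simp [h]
  · rw [Bool.not_eq_true] at h
    simp only [h, Bool.false_eq_true, if_false, PySem.Dict.modify, PySem.Dict.getD_insert_self,
      PySem.Dict.getD_of_not_contains d ([] : List String) h, PySem.Dict.insert_insert_self]

-- a foldl whose step skips the elements satisfying c is a foldl over the filtered list
theorem pv_foldl_filter {α β : Type} (c : α → Bool) (g : β → α → β) :
    ∀ (l : List α) (init : β),
      l.foldl (fun acc x => if c x then acc else g acc x) init
        = (l.filter (fun x => !c x)).foldl g init := by
  intro l
  induction l with
  | nil => intro init; rfl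
  | cons x t ih =>
    intro init
    by_cases hx : c x = true
    · simp [List.foldl_cons, hx, ih]
    · rw [Bool.not_eq_true] at hx
      simp [List.foldl_cons, hx, ih]

-- a dict with Nodup keys is the list of its keys paired with their values
theorem pv_items_eq (d : PySem.Dict String (List String)) (h : d.keys.Nodup) :
    d.items = d.keys.map (fun k => (k, d.getD k [])) := by
  have : d.keys.map (fun k => (k, d.getD k [])) = d.items.map (fun p => (p.1, d.getD p.1 [])) := by
    simp only [PySem.Dict.keys, List.map_map]; rfl
  rw [this]
  have : d.items.map (fun p => (p.1, d.getD p.1 [])) = d.items.map (fun p => p) := by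
    apply List.map_congr_left
    intro p hp
    have : d.getD p.1 [] = p.2 := PySem.Dict.getD_of_mem_items d (by exact hp) h []
    simp [this]
  simp [this]

theorem pv_contains_ofList (bl : List String) (x : String) :
    PySem.Set.contains (PySem.Set.ofList bl) x = bl.contains x := by
  rcases h : bl.contains x with _ | _
  · have hx : x ∉ bl := by simpa using h
    have h2 : x ∉ PySem.Set.ofList bl := fun hm => hx ((PySem.Set.mem_ofList bl x).mp hm)
    unfold PySem.Set.contains
    exact Bool.eq_false_iff.mpr (fun hc => h2 (List.contains_iff_mem.mp hc))
  · unfold PySem.Set.contains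
    exact List.contains_iff_mem.mpr ((PySem.Set.mem_ofList bl x).mpr (List.contains_iff_mem.mp h))

theorem pv_main (query_params : List (String × String)) (black_list_values : List String) :
    extract_search_params_from_request query_params black_list_values
      = extract_search_params_from_request_alt query_params black_list_values := by
  unfold extract_search_params_from_request extract_search_params_from_request_alt
  -- 1. A's step function is the skip-or-modify step
  have hstep :
      (fun (query_params_dict : PySem.Dict String (List String)) (search_condition : String × String) =>
        let current_key := search_condition.1
        if black_list_values.contains search_condition.1 then query_params_dict
        else
          let query_params_dict :=
            if query_params_dict.contains current_key then query_params_dict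
            else query_params_dict.insert current_key ([] : List String)
          query_params_dict.modify current_key [] (fun l => l ++ [search_condition.2]))
      = (fun (d : PySem.Dict String (List String)) (p : String × String) =>
          if black_list_values.contains p.1 then d
          else d.modify p.1 [] (fun ls => ls ++ [p.2])) := by
    funext d p
    by_cases hb : black_list_values.contains p.1 = true
    · rw [hb]; simp
    · rw [Bool.not_eq_true] at hb
      simp only [hb, Bool.false_eq_true, if_false]
      exact pv_step_eq d p.1 p.2
  rw [hstep]
  have hff : List.foldl
        (fun (d : PySem.Dict String (List String)) (p : String × String) =>
          if black_list_values.contains p.1 then d else d.modify p.1 [] (fun ls => ls ++ [p.2]))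
        PySem.Dict.empty query_params
      = List.foldl (fun d p => d.modify p.1 [] (fun ls => ls ++ [p.2])) PySem.Dict.empty
          (query_params.filter (fun kv => !(black_list_values.contains kv.1))) :=
    pv_foldl_filter (fun p : String × String => black_list_values.contains p.1)
      (fun d p => d.modify p.1 [] (fun ls => ls ++ [p.2])) query_params PySem.Dict.empty
  rw [hff]
  set l := query_params.filter (fun kv => !(black_list_values.contains kv.1)) with hl
  -- 2. keys of the built dict
  have hkeys : (l.foldl (fun d (p : String × String) => d.modify p.1 [] (fun ls => ls ++ [p.2]))
      PySem.Dict.empty).keys = PySem.Set.ofList (l.map (fun kv => kv.1)) := by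
    rw [PySem.Dict.keys_foldl_modify_key l (fun p => p.1) [] (fun _ p => (fun ls => ls ++ [p.2]))
      PySem.Dict.empty]
    rfl
  have hnodup : (l.foldl (fun d (p : String × String) => d.modify p.1 [] (fun ls => ls ++ [p.2]))
      PySem.Dict.empty).keys.Nodup := by
    apply PySem.Dict.nodup_keys_foldl_modify_key l (fun p => p.1) [] (fun _ p => (fun ls => ls ++ [p.2]))
    simp [PySem.Dict.keys_empty]
  -- 3. items = keys paired with values
  rw [pv_items_eq _ hnodup, hkeys]
  -- 4. both key lists coincide
  have hbkeys : PySem.List.dedup ((query_params.filter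
      (fun kv => !(PySem.Set.contains (PySem.Set.ofList black_list_values) kv.1))).map (fun kv => kv.1))
      = PySem.Set.ofList (l.map (fun kv => kv.1)) := by
    rw [PySem.List.dedup_eq_ofList]
    congr 1
    rw [hl]
    congr 1
    apply List.filter_congr
    intro p _
    rw [pv_contains_ofList]
  rw [hbkeys]
  -- 5. per-key values coincide
  apply List.map_congr_left
  intro k hk
  have hkl : k ∈ l.map (fun kv => kv.1) := (PySem.Set.mem_ofList _ k).mp hk
  have hknb : black_list_values.contains k = false := by
    rcases List.mem_map.mp hkl with ⟨p, hpl, hpk⟩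
    rw [hl, List.mem_filter] at hpl
    rw [← hpk]
    rcases hc : black_list_values.contains p.1 with _ | _
    · rfl
    · rw [hc] at hpl; simp at hpl
  have hval : (l.foldl (fun d (p : String × String) => d.modify p.1 [] (fun ls => ls ++ [p.2]))
      PySem.Dict.empty).getD k []
      = (query_params.filter (fun kv => kv.1 == k)).map (fun kv => kv.2) := by
    rw [PySem.Dict.getD_foldl_modify_append l PySem.Dict.empty k]
    have : l.filter (fun p => p.1 == k) = query_params.filter (fun kv => kv.1 == k) := by
      rw [hl, List.filter_filter]
      apply List.filter_congr
      intro p _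
      rcases hpk : (p.1 == k) with _ | _
      · rfl
      · have hpek : p.1 = k := eq_of_beq hpk
        have hk2 : k ∉ black_list_values := by simpa using hknb
        simp [hpek, hk2]
    rw [this]
    simp [PySem.Dict.getD_empty]
  rw [hval]

-- ===== VERDICT (by name: the statement is the Claim_ definition above) =====
theorem extract_search_params_from_request_spec : Claim_equal_extract_search_params_from_request := by
  intro query_params black_list_values _
  unfold Spec_extract_search_params_from_request
  exact pv_main query_params black_list_values
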